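-- pv_equiv track=rewrite | github.com/keepCoding01/Pemikiran-Komputasi | Latihan 3/soal4.py | minimalSoal
-- ===== SOURCE A (Python) =====
-- def minimalSoal(anak):
--     for n in range(len(anak)):
--         node = n
--         for m in range(n + 1, len(anak)):
--             if anak[m] < anak[node]:
--                 node = m
--         anak[n], anak[node] = anak[node], anak[n]
--
--     soal = 0
--
--     for i in range(0, len(anak), 2):
--         if anak[i] != anak[i + 1]:
--             soal += anak[i + 1] - anak[i]
--
--     return soal
-- ===== SOURCE B (Python) =====
-- def minimalSoal(anak):
--     # Same-name re-implementation: built-in in-place sort (anak ends up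
--     # ascending, as A's selection sort leaves it), then one strided sum
--     # over the pairs.  On odd-length input anak[i+1] raises IndexError,
--     # just as A does.
--     anak.sort()
--     return sum(anak[i + 1] - anak[i] for i in range(0, len(anak), 2))
-- ===== Notes on version B (the rewrite author's own statement) =====
-- stated objective: faster
-- what changed: Replaces the hand-written O(n^2) selection sort with the built-in in-place sort and folds the pair differences in a single generator sum without the redundant inequality test.
import Mathlib
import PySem

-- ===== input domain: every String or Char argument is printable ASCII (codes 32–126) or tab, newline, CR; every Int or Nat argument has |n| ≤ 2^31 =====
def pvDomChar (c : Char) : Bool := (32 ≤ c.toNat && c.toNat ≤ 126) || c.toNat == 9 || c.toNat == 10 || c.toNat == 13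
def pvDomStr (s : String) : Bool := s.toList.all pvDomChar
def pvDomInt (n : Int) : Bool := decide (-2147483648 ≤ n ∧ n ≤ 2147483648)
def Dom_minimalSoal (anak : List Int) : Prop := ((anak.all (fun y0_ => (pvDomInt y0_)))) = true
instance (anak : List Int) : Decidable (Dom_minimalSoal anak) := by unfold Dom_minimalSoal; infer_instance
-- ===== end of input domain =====

-- B replaces A's hand-written selection sort by the built-in in-place sort and sums
-- the pair differences in one strided pass (objective: faster).  Both A and B sort
-- the argument list in place in Python; the theorems below are about the return value.

-- ===== PORT A =====
-- inner loop 'for m in range(n+1, len(anak)): if anak[m] < anak[node]: node = m'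
def selFind (xs : List Int) (i node : Int) : Int :=
  (PySem.List.pyRange i xs.length 1).foldl
    (fun nd m => if PySem.List.pyGetD xs m 0 < PySem.List.pyGetD xs nd 0 then m else nd) node

-- one iteration of the outer loop: find min index from n, then swap anak[n] and anak[node]
def selStep (xs : List Int) (n : Int) : List Int :=
  let node := selFind xs (n + 1) n
  let a := PySem.List.pyGetD xs n 0
  let b := PySem.List.pyGetD xs node 0
  PySem.List.pySetD (PySem.List.pySetD xs n b) node a

def minimalSoal (anak : List Int) : Int :=
  let anak2 := (PySem.List.pyRange 0 anak.length 1).foldl selStep anak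
  (PySem.List.pyRange 0 anak2.length 2).foldl
    (fun soal i =>
      if PySem.List.pyGetD anak2 i 0 ≠ PySem.List.pyGetD anak2 (i + 1) 0 then
        soal + (PySem.List.pyGetD anak2 (i + 1) 0 - PySem.List.pyGetD anak2 i 0)
      else soal) 0

-- ===== PORT B =====
-- 'anak.sort()' then 'sum(anak[i+1] - anak[i] for i in range(0, len(anak), 2))'
def minimalSoal_alt (anak : List Int) : Int :=
  let s := PySem.List.sorted anak (fun x => x) false
  (PySem.List.pyRange 0 s.length 2).foldl
    (fun soal i => soal + (PySem.List.pyGetD s (i + 1) 0 - PySem.List.pyGetD s i 0)) 0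

-- ===== PRECONDITION & SPEC =====
-- Pre_ excludes exactly the odd-length lists, on which both A and B raise IndexError at anak[i+1].
def Pre_minimalSoal (anak : List Int) : Prop := anak.length % 2 = 0
instance (anak : List Int) : Decidable (Pre_minimalSoal anak) := by unfold Pre_minimalSoal; infer_instance
def pvWitness_minimalSoal : List Int := [3, 1, 2, 2]

def Spec_minimalSoal (anak : List Int) (out : Int) : Prop := out = minimalSoal_alt anak
instance (anak : List Int) (out : Int) : Decidable (Spec_minimalSoal anak out) := by unfold Spec_minimalSoal; infer_instance

-- ===== CLAIM (what is proved, stated in full; the proofs are below) =====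
def Claim_equal_minimalSoal : Prop := ∀ (anak : List Int), Dom_minimalSoal anak → Pre_minimalSoal anak → Spec_minimalSoal anak (minimalSoal anak)

-- ===== LEMMAS AND PROOFS =====

-- sum of differences over consecutive pairs: the common value of both pair loops
def pairDiffSum : List Int → Int
  | lo :: hi :: t => (hi - lo) + pairDiffSum t
  | _ => 0

-- range(a, b, 2) induction forms
theorem pyRange_two_eq_nil {a b : Int} (h : b ≤ a) : PySem.List.pyRange a b 2 = [] := by
  simp [PySem.List.pyRange, show ¬ a < b by omega]

theorem pyRange_two_cons {a b : Int} (h : a < b) :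
    PySem.List.pyRange a b 2 = a :: PySem.List.pyRange (a + 2) b 2 := by
  unfold PySem.List.pyRange
  simp only [show (2 : Int) ≠ 0 by norm_num, if_false, show (0 : Int) < 2 by norm_num, h, if_pos]
  have hc : ((b - a + 2 - 1) / 2).toNat
      = (if a + 2 < b then ((b - (a + 2) + 2 - 1) / 2).toNat else 0) + 1 := by
    split <;> omega
  rw [hc]
  split
  · rw [List.range_succ_eq_map, List.map_cons, List.map_map]
    refine congrArg₂ _ (by push_cast; ring) (List.map_congr_left ?_)
    intro k _; simp [Function.comp]; ring
  · rw [List.range_succ_eq_map]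
    simp

theorem selFind_spec (xs : List Int) (fuel : Nat) : ∀ (i node : Int),
    fuel = ((xs.length : Int) - i).toNat → 0 ≤ i → 0 ≤ node → node < (xs.length : Int) →
    0 ≤ selFind xs i node ∧ selFind xs i node < (xs.length : Int) ∧
    (selFind xs i node = node ∨ i ≤ selFind xs i node) ∧
    PySem.List.pyGetD xs (selFind xs i node) 0 ≤ PySem.List.pyGetD xs node 0 ∧
    (∀ j : Int, i ≤ j → j < (xs.length : Int) →
      PySem.List.pyGetD xs (selFind xs i node) 0 ≤ PySem.List.pyGetD xs j 0) := by
  induction fuel with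
  | zero =>
    intro i node hf hi0 h0 h1
    have hle : (xs.length : Int) ≤ i := by omega
    unfold selFind
    rw [PySem.List.pyRange_one_eq_nil hle]
    refine ⟨h0, h1, Or.inl rfl, le_rfl, fun j hj hj2 => by omega⟩
  | succ n ih =>
    intro i node hf hi0 h0 h1
    by_cases hib : i < (xs.length : Int)
    · have hstep : selFind xs i node =
          selFind xs (i + 1) (if PySem.List.pyGetD xs i 0 < PySem.List.pyGetD xs node 0 then i else node) := by
        unfold selFind
        rw [PySem.List.pyRange_one_cons hib, List.foldl_cons]
      by_cases hcond : PySem.List.pyGetD xs i 0 < PySem.List.pyGetD xs node 0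
      · rw [if_pos hcond] at hstep
        obtain ⟨r0, r1, r2, r3, r4⟩ := ih (i + 1) i (by omega) (by omega) (by omega) hib
        rw [← hstep] at r0 r1 r2 r3 r4
        refine ⟨r0, r1, by omega, le_trans r3 (le_of_lt hcond), ?_⟩
        intro j hj hj2
        rcases eq_or_lt_of_le hj with rfl | hlt
        · exact r3
        · exact r4 j (by omega) hj2
      · rw [if_neg hcond] at hstep
        obtain ⟨r0, r1, r2, r3, r4⟩ := ih (i + 1) node (by omega) (by omega) h0 h1
        rw [← hstep] at r0 r1 r2 r3 r4
        refine ⟨r0, r1, by omega, r3, ?_⟩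
        intro j hj hj2
        rcases eq_or_lt_of_le hj with rfl | hlt
        · exact le_trans r3 (le_of_not_gt hcond)
        · exact r4 j (by omega) hj2
    · unfold selFind
      rw [PySem.List.pyRange_one_eq_nil (by omega)]
      refine ⟨h0, h1, Or.inl rfl, le_rfl, fun j hj hj2 => by omega⟩

theorem drop_swap (xs : List Int) (K N : Nat) (a b : Int) (hKN : K ≤ N) (hN : N < xs.length) :
    ((xs.set K b).set N a).drop K = ((xs.drop K).set 0 b).set (N - K) a := by
  apply List.ext_getElem (by simp)
  intro t h1 h2
  simp only [List.getElem_drop, List.getElem_set]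
  split_ifs <;> first | rfl | omega

theorem swap0_perm (s : List Int) (j : Nat) (hj : j < s.length) (h0 : 0 < s.length) :
    ((s.set 0 (s[j]'hj)).set j (s[0]'h0)).Perm s := by
  cases s with
  | nil => simp at h0
  | cons a t =>
    cases j with
    | zero => simp
    | succ i =>
      have hi : i < t.length := by simpa using hj
      simp only [List.getElem_cons_succ, List.getElem_cons_zero, List.set_cons_zero,
        List.set_cons_succ]
      have ht : t = t.take i ++ t[i] :: t.drop (i + 1) := by
        rw [← List.drop_eq_getElem_cons hi, List.take_append_drop]
      have hset : t.set i a = t.take i ++ a :: t.drop (i + 1) := by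
        rw [List.set_eq_take_append_cons_drop, if_pos hi]
      have key : ∀ (u v : List Int) (c : Int), (c :: (u ++ a :: v)).Perm (a :: (u ++ c :: v)) := by
        intro u v c
        exact ((List.Perm.cons c List.perm_middle).trans (List.Perm.swap a c _)).trans
          (List.Perm.cons a List.perm_middle.symm)
      have hk := key (t.take i) (t.drop (i + 1)) t[i]
      rw [← hset, ← ht] at hk
      exact hk

theorem selStep_length (xs : List Int) (k : Int) : (selStep xs k).length = xs.length := by
  show (PySem.List.pySetD (PySem.List.pySetD xs k
      (PySem.List.pyGetD xs (selFind xs (k+1) k) 0))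
      (selFind xs (k+1) k) (PySem.List.pyGetD xs k 0)).length = xs.length
  simp [PySem.List.length_pySetD]

theorem selStep_glue (xs : List Int) (k : Int) (h0 : 0 ≤ k) (hk : k < (xs.length : Int)) :
    (selStep xs k).take (k.toNat + 1) ++
      PySem.List.sorted ((selStep xs k).drop (k.toNat + 1)) (fun x => x) false
      = xs.take k.toNat ++ PySem.List.sorted (xs.drop k.toNat) (fun x => x) false := by
  obtain ⟨n0, n1, n2, n3, n4⟩ :=
    selFind_spec xs ((xs.length : Int) - (k+1)).toNat (k+1) k rfl (by omega) h0 hk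
  obtain ⟨node, hnode⟩ : ∃ nd, nd = selFind xs (k + 1) k := ⟨_, rfl⟩
  rw [← hnode] at n0 n1 n2 n3 n4
  obtain ⟨K, hK⟩ : ∃ K, K = k.toNat := ⟨_, rfl⟩
  obtain ⟨N, hN⟩ : ∃ N, N = node.toNat := ⟨_, rfl⟩
  have hKN : K ≤ N := by omega
  have hNlen : N < xs.length := by omega
  have hKlen : K < xs.length := by omega
  have ha : PySem.List.pyGetD xs k 0 = xs[K]'hKlen := by
    subst hK; exact PySem.List.pyGetD_eq_getElem xs 0 h0 hk
  have hb : PySem.List.pyGetD xs node 0 = xs[N]'hNlen := by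
    subst hN; exact PySem.List.pyGetD_eq_getElem xs 0 n0 n1
  have hys : selStep xs k = (xs.set K (xs[N])).set N (xs[K]) := by
    show PySem.List.pySetD (PySem.List.pySetD xs k
        (PySem.List.pyGetD xs (selFind xs (k+1) k) 0))
        (selFind xs (k+1) k) (PySem.List.pyGetD xs k 0) = _
    rw [← hnode, PySem.List.pySetD_of_nonneg _ _ h0, PySem.List.pySetD_of_nonneg _ _ n0,
      ha, hb]
    subst hK; subst hN; rfl
  set ys := selStep xs k with hysdef
  set s := xs.drop K with hs
  have hyslen : ys.length = xs.length := by rw [hys]; simp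
  have hysK : ys[K]'(by omega) = xs[N] := by
    simp only [hys]
    by_cases hNK : N = K
    · simp [hNK]
    · simp [hNK]
  have hminI : ∀ j : Int, k ≤ j → j < (xs.length : Int) →
      xs[N] ≤ PySem.List.pyGetD xs j 0 := by
    intro j hj hj2
    rcases eq_or_lt_of_le hj with rfl | hlt
    · rw [← hb]; exact n3
    · rw [← hb]; exact n4 j (by omega) hj2
  have hmin : ∀ y ∈ s, xs[N] ≤ y := by
    intro y hy
    rw [hs, List.mem_drop_iff_getElem] at hy
    obtain ⟨t, ht, rfl⟩ := hy
    have := hminI (K + t : Nat) (by omega) (by push_cast; omega)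
    rwa [PySem.List.pyGetD_eq_getElem xs 0 (by positivity) (by omega)] at this
  have hdsperm : (ys.drop K).Perm s := by
    rw [hys, drop_swap xs K N _ _ hKN hNlen]
    have hsl : s.length = xs.length - K := by simp [hs]
    have e1 : xs[N] = s[N - K]'(by omega) := by
      simp only [hs, List.getElem_drop]; congr 1; omega
    have e2 : (xs[K]'hKlen) = s[0]'(by omega) := by
      simp only [hs, List.getElem_drop, Nat.add_zero]
    rw [e1, e2]
    exact swap0_perm s (N - K) (by omega) (by omega)
  have hdrop : ys.drop K = xs[N] :: ys.drop (K + 1) := by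
    rw [List.drop_eq_getElem_cons (by omega), hysK]
  set rest := ys.drop (K + 1) with hrest
  have hperm2 : (xs[N] :: rest).Perm s := by rw [← hdrop]; exact hdsperm
  have hsorted : PySem.List.sorted s (fun x => x) false
      = xs[N] :: PySem.List.sorted rest (fun x => x) false := by
    apply PySem.List.sorted_id_eq_of_perm_of_pairwise
    · exact (List.Perm.cons _ (PySem.List.sorted_perm rest (fun x => x) false)).trans hperm2
    · constructor
      · intro y hy
        apply hmin
        rw [hperm2.mem_iff.symm]
        exact List.mem_cons_of_mem _ ((PySem.List.mem_sorted _ _ _ _).1 hy)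
      · exact PySem.List.sorted_pairwise rest (fun x => x)
  have htake : ys.take K = xs.take K := by
    rw [hys, List.take_set_of_le hKN, List.take_set_of_le le_rfl]
  have htake1 : ys.take (K + 1) = xs.take K ++ [xs[N]] := by
    rw [List.take_succ, htake, List.getElem?_eq_getElem (by omega), hysK]
    rfl
  rw [← hK]
  rw [htake1, hsorted, List.append_assoc]
  rfl

theorem sel_main (fuel : Nat) : ∀ (xs : List Int) (k : Int), 0 ≤ k →
    fuel = ((xs.length : Int) - k).toNat →
    (PySem.List.pyRange k xs.length 1).foldl selStep xs
      = xs.take k.toNat ++ PySem.List.sorted (xs.drop k.toNat) (fun x => x) false := by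
  induction fuel with
  | zero =>
    intro xs k h0 hf
    rw [PySem.List.pyRange_one_eq_nil (by omega)]
    have hd : xs.drop k.toNat = [] := List.drop_eq_nil_of_le (by omega)
    have ht : xs.take k.toNat = xs := List.take_of_length_le (by omega)
    have hnil2 : (PySem.List.sorted (List.drop k.toNat xs) (fun x => x) false) = [] :=
      (PySem.List.sorted_eq_nil_iff _ _ _).2 hd
    rw [List.foldl_nil, ht, hnil2, List.append_nil]
  | succ n ih =>
    intro xs k h0 hf
    by_cases hk : k < (xs.length : Int)
    · rw [PySem.List.pyRange_one_cons hk, List.foldl_cons]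
      have hlen : ((selStep xs k).length : Int) = (xs.length : Int) := by
        rw [selStep_length]
      rw [show (xs.length : Int) = ((selStep xs k).length : Int) from hlen.symm]
      rw [ih (selStep xs k) (k + 1) (by omega) (by rw [selStep_length]; omega)]
      have h1 : (k + 1).toNat = k.toNat + 1 := by omega
      rw [h1]
      exact selStep_glue xs k h0 hk
    · rw [PySem.List.pyRange_one_eq_nil (by omega)]
      have hd : xs.drop k.toNat = [] := List.drop_eq_nil_of_le (by omega)
      have ht : xs.take k.toNat = xs := List.take_of_length_le (by omega)
      have hnil : (PySem.List.sorted (List.drop k.toNat xs) (fun x => x) false) = [] :=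
        (PySem.List.sorted_eq_nil_iff _ _ _).2 hd
      simp [ht, hnil]

-- the selection-sort fold computes Python's sorted()
theorem sel_sorts (xs : List Int) :
    (PySem.List.pyRange 0 xs.length 1).foldl selStep xs
      = PySem.List.sorted xs (fun x => x) false := by
  have h := sel_main ((xs.length : Int) - 0).toNat xs 0 le_rfl rfl
  simpa using h

-- A's pair loop (with the redundant != test) computes pairDiffSum
theorem pairfoldA (t : List Int) : ∀ (zs : List Int) (k c : Int), 0 ≤ k →
    zs.drop k.toNat = t → (2 : Int) ∣ ((zs.length : Int) - k) →
    (PySem.List.pyRange k zs.length 2).foldl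
      (fun soal i =>
        if PySem.List.pyGetD zs i 0 ≠ PySem.List.pyGetD zs (i + 1) 0 then
          soal + (PySem.List.pyGetD zs (i + 1) 0 - PySem.List.pyGetD zs i 0)
        else soal) c = c + pairDiffSum t := by
  induction t using pairDiffSum.induct with
  | case1 lo hi t' ih =>
    intro zs k c hk0 hdrop hpar
    have hlen : k.toNat + 2 ≤ zs.length := by
      have := congrArg List.length hdrop
      simp at this; omega
    have hkl : k < (zs.length : Int) := by omega
    rw [pyRange_two_cons hkl, List.foldl_cons]
    have hlo : PySem.List.pyGetD zs k 0 = lo := by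
      have hq : zs[k.toNat + 0]? = some lo := by
        have := congrArg (fun l => l[0]?) hdrop
        simpa [List.getElem?_drop] using this
      rw [PySem.List.pyGetD_eq_getElem zs 0 hk0 hkl]
      rw [List.getElem?_eq_getElem (by omega)] at hq
      simpa using hq
    have hhi : PySem.List.pyGetD zs (k + 1) 0 = hi := by
      have hq : zs[k.toNat + 1]? = some hi := by
        have := congrArg (fun l => l[1]?) hdrop
        simpa [List.getElem?_drop] using this
      rw [PySem.List.pyGetD_eq_getElem zs 0 (by omega) (by omega)]
      rw [List.getElem?_eq_getElem (by omega)] at hq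
      have hidx : (k + 1).toNat = k.toNat + 1 := by omega
      simp only [hidx]
      simpa using hq
    have hstep : (if PySem.List.pyGetD zs k 0 ≠ PySem.List.pyGetD zs (k + 1) 0 then
          c + (PySem.List.pyGetD zs (k + 1) 0 - PySem.List.pyGetD zs k 0)
        else c) = c + (hi - lo) := by
      rw [hlo, hhi]; split
      · rfl
      · next h => simp at h; rw [h]; ring
    rw [hstep]
    rw [ih zs (k + 2) (c + (hi - lo)) (by omega)
      (by rw [show (k+2).toNat = k.toNat + 2 by omega, ← List.drop_drop, hdrop]; rfl)
      (by omega)]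
    show c + (hi - lo) + pairDiffSum t' = c + ((hi - lo) + pairDiffSum t')
    ring
  | case2 t' hne =>
    intro zs k c hk0 hdrop hpar
    have : t' = [] := by
      rcases t' with _ | ⟨x, _ | ⟨y, r⟩⟩
      · rfl
      · exfalso
        have := congrArg List.length hdrop
        simp at this
        omega
      · exact absurd rfl (hne x y r)
    subst this
    have hkl : (zs.length : Int) ≤ k := by
      have := congrArg List.length hdrop
      simp at this; omega
    rw [pyRange_two_eq_nil hkl]
    simp [pairDiffSum]

-- B's pair loop (unconditional sum) computes pairDiffSum
theorem pairfoldB (t : List Int) : ∀ (zs : List Int) (k c : Int), 0 ≤ k →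
    zs.drop k.toNat = t → (2 : Int) ∣ ((zs.length : Int) - k) →
    (PySem.List.pyRange k zs.length 2).foldl
      (fun soal i => soal + (PySem.List.pyGetD zs (i + 1) 0 - PySem.List.pyGetD zs i 0)) c
      = c + pairDiffSum t := by
  induction t using pairDiffSum.induct with
  | case1 lo hi t' ih =>
    intro zs k c hk0 hdrop hpar
    have hlen : k.toNat + 2 ≤ zs.length := by
      have := congrArg List.length hdrop
      simp at this; omega
    have hkl : k < (zs.length : Int) := by omega
    rw [pyRange_two_cons hkl, List.foldl_cons]
    have hlo : PySem.List.pyGetD zs k 0 = lo := by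
      have hq : zs[k.toNat + 0]? = some lo := by
        have := congrArg (fun l => l[0]?) hdrop
        simpa [List.getElem?_drop] using this
      rw [PySem.List.pyGetD_eq_getElem zs 0 hk0 hkl]
      rw [List.getElem?_eq_getElem (by omega)] at hq
      simpa using hq
    have hhi : PySem.List.pyGetD zs (k + 1) 0 = hi := by
      have hq : zs[k.toNat + 1]? = some hi := by
        have := congrArg (fun l => l[1]?) hdrop
        simpa [List.getElem?_drop] using this
      rw [PySem.List.pyGetD_eq_getElem zs 0 (by omega) (by omega)]
      rw [List.getElem?_eq_getElem (by omega)] at hq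
      have hidx : (k + 1).toNat = k.toNat + 1 := by omega
      simp only [hidx]
      simpa using hq
    rw [hlo, hhi]
    rw [ih zs (k + 2) (c + (hi - lo)) (by omega)
      (by rw [show (k+2).toNat = k.toNat + 2 by omega, ← List.drop_drop, hdrop]; rfl)
      (by omega)]
    show c + (hi - lo) + pairDiffSum t' = c + ((hi - lo) + pairDiffSum t')
    ring
  | case2 t' hne =>
    intro zs k c hk0 hdrop hpar
    have : t' = [] := by
      rcases t' with _ | ⟨x, _ | ⟨y, r⟩⟩
      · rfl
      · exfalso
        have := congrArg List.length hdrop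
        simp at this
        omega
      · exact absurd rfl (hne x y r)
    subst this
    have hkl : (zs.length : Int) ≤ k := by
      have := congrArg List.length hdrop
      simp at this; omega
    rw [pyRange_two_eq_nil hkl]
    simp [pairDiffSum]

-- ===== VERDICT (by name: the statement is the Claim_ definition above) =====
theorem minimalSoal_spec : Claim_equal_minimalSoal := by
  intro anak _ hpre
  unfold Spec_minimalSoal minimalSoal minimalSoal_alt
  rw [sel_sorts]
  have hlen : (PySem.List.sorted anak (fun x => x) false).length = anak.length :=
    (PySem.List.sorted_perm anak (fun x => x) false).length_eq
  have hdiv : (2 : Int) ∣ (((PySem.List.sorted anak (fun x => x) false).length : Int) - 0) := by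
    rw [hlen]; unfold Pre_minimalSoal at hpre; omega
  have hA := pairfoldA (PySem.List.sorted anak (fun x => x) false)
      (PySem.List.sorted anak (fun x => x) false) 0 0 le_rfl (by simp) hdiv
  have hB := pairfoldB (PySem.List.sorted anak (fun x => x) false)
      (PySem.List.sorted anak (fun x => x) false) 0 0 le_rfl (by simp) hdiv
  simp only at hA hB ⊢
  rw [hA, hB]
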